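-- pv_equiv track=rewrite | github.com/Skinz1434/CipherRecon | text_transforms.py | to_medieval
-- ===== SOURCE A (Python) =====
-- def to_medieval(text: str) -> str:
--     """Convert text to medieval-style characters"""
--     if not text:
--         return ""
--     medieval_map = {
--         'a': '𝔞', 'b': '𝔟', 'c': '𝔠', 'd': '𝔡', 'e': '𝔢', 'f': '𝔣', 'g': '𝔤', 'h': '𝔥', 'i': '𝔦',
--         'j': '𝔧', 'k': '𝔨', 'l': '𝔩', 'm': '𝔪', 'n': '𝔫', 'o': '𝔬', 'p': '𝔭', 'q': '𝔮', 'r': '𝔯',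
--         's': '𝔰', 't': '𝔱', 'u': '𝔲', 'v': '𝔳', 'w': '𝔴', 'x': '𝔵', 'y': '𝔶', 'z': '𝔷',
--         'A': '𝔄', 'B': '𝔅', 'C': 'ℭ', 'D': '𝔇', 'E': '𝔈', 'F': '𝔉', 'G': '𝔊', 'H': 'ℌ', 'I': 'ℑ',
--         'J': '𝔍', 'K': '𝔎', 'L': '𝔏', 'M': '𝔐', 'N': '𝔑', 'O': '𝔒', 'P': '𝔓', 'Q': '𝔔', 'R': 'ℜ',
--         'S': '𝔖', 'T': '𝔗', 'U': '𝔘', 'V': '𝔙', 'W': '𝔚', 'X': '𝔛', 'Y': '𝔜', 'Z': 'ℨ',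
--         ' ': ' '
--     }
--     return ''.join(medieval_map.get(c, c) for c in text)
-- ===== SOURCE B (Python) =====
-- _UPPER_EXC = {'C': '\u212d', 'H': '\u210c', 'I': '\u2111', 'R': '\u211c', 'Z': '\u2128'}
--
-- def to_medieval(text: str) -> str:
--     out = []
--     for c in text:
--         if 'a' <= c <= 'z':
--             out.append(chr(ord(c) - 97 + 0x1D51E))
--         elif 'A' <= c <= 'Z':
--             out.append(_UPPER_EXC.get(c) or chr(ord(c) - 65 + 0x1D504))
--         else:
--             out.append(c)
--     return ''.join(out)
-- ===== Notes on version B (the rewrite author's own statement) =====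
-- stated objective: simpler
-- what changed: B replaces A's 53-entry character lookup table with codepoint arithmetic (constant offsets into the Mathematical Fraktur blocks) plus a 5-entry dict for the Letterlike-Symbols exceptions C,H,I,R,Z.
import Mathlib
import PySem

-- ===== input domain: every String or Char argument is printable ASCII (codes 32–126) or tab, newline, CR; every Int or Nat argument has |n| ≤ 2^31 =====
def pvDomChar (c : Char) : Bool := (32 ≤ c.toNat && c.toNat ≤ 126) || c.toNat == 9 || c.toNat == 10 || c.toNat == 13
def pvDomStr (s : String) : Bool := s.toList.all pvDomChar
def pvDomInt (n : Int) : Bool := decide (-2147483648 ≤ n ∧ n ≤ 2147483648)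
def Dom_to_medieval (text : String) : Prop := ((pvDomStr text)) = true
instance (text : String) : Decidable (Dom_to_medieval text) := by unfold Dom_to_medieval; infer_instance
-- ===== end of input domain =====

-- B replaces A's 53-entry lookup table by codepoint arithmetic (offset into the Fraktur blocks)
-- plus the five genuine Letterlike-Symbols exceptions; objective: simpler.

-- ===== PORT A =====
def medievalMap : PySem.Dict Char String := PySem.Dict.ofList
  [('a', "𝔞"), ('b', "𝔟"), ('c', "𝔠"), ('d', "𝔡"), ('e', "𝔢"), ('f', "𝔣"), ('g', "𝔤"), ('h', "𝔥"), ('i', "𝔦"),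
   ('j', "𝔧"), ('k', "𝔨"), ('l', "𝔩"), ('m', "𝔪"), ('n', "𝔫"), ('o', "𝔬"), ('p', "𝔭"), ('q', "𝔮"), ('r', "𝔯"),
   ('s', "𝔰"), ('t', "𝔱"), ('u', "𝔲"), ('v', "𝔳"), ('w', "𝔴"), ('x', "𝔵"), ('y', "𝔶"), ('z', "𝔷"),
   ('A', "𝔄"), ('B', "𝔅"), ('C', "ℭ"), ('D', "𝔇"), ('E', "𝔈"), ('F', "𝔉"), ('G', "𝔊"), ('H', "ℌ"), ('I', "ℑ"),
   ('J', "𝔍"), ('K', "𝔎"), ('L', "𝔏"), ('M', "𝔐"), ('N', "𝔑"), ('O', "𝔒"), ('P', "𝔓"), ('Q', "𝔔"), ('R', "ℜ"),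
   ('S', "𝔖"), ('T', "𝔗"), ('U', "𝔘"), ('V', "𝔙"), ('W', "𝔚"), ('X', "𝔛"), ('Y', "𝔜"), ('Z', "ℨ"),
   (' ', " ")]

def to_medieval (text : String) : String :=
  if text = "" then ""
  else PySem.Str.join "" (text.toList.map (fun c => medievalMap.getD c (String.ofList [c])))

-- ===== PORT B =====
def upperExc : PySem.Dict Char String := PySem.Dict.ofList
  [('C', "ℭ"), ('H', "ℌ"), ('I', "ℑ"), ('R', "ℜ"), ('Z', "ℨ")]

-- the Python '_UPPER_EXC.get(c) or chr(…)': every dict value is a non-empty (truthy) string,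
-- so `x or y` is exactly "some s → s, none → y"
def medievalChar (c : Char) : String :=
  if 'a' ≤ c ∧ c ≤ 'z' then String.ofList [Char.ofNat (c.toNat - 97 + 0x1D51E)]
  else if 'A' ≤ c ∧ c ≤ 'Z' then
    match upperExc.get? c with
    | some s => s
    | none => String.ofList [Char.ofNat (c.toNat - 65 + 0x1D504)]
  else String.ofList [c]

def to_medieval_alt (text : String) : String :=
  PySem.Str.join "" (text.toList.map medievalChar)

-- ===== PRECONDITION & SPEC =====
def Spec_to_medieval (text : String) (out : String) : Prop := out = to_medieval_alt text
instance (text : String) (out : String) : Decidable (Spec_to_medieval text out) := by unfold Spec_to_medieval; infer_instance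

-- ===== CLAIM (what is proved, stated in full; the proofs are below) =====
def Claim_equal_to_medieval : Prop := ∀ (text : String), Dom_to_medieval text → Spec_to_medieval text (to_medieval text)

-- ===== LEMMAS AND PROOFS =====

-- per-character agreement of the two mappings on every ASCII codepoint
theorem char_eq (c : Char) (h : pvDomChar c = true) :
    medievalMap.getD c (String.ofList [c]) = medievalChar c := by
  have hlt : c.toNat < 127 := by
    simp only [pvDomChar, Bool.or_eq_true, Bool.and_eq_true, decide_eq_true_eq,
      Nat.beq_eq_true_eq] at h
    omega
  have hall : ∀ n, n < 127 →
      medievalMap.getD (Char.ofNat n) (String.ofList [Char.ofNat n]) = medievalChar (Char.ofNat n) := by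
    set_option maxRecDepth 40000 in decide
  have := hall c.toNat hlt
  rwa [Char.ofNat_toNat] at this

-- ===== VERDICT (by name: the statement is the Claim_ definition above) =====
theorem to_medieval_spec : Claim_equal_to_medieval := by
  intro text hdom
  unfold Spec_to_medieval to_medieval to_medieval_alt
  have hmap : text.toList.map (fun c => medievalMap.getD c (String.ofList [c]))
      = text.toList.map medievalChar := by
    apply List.map_congr_left
    intro c hc
    have : pvDomChar c = true := by
      have := hdom
      unfold Dom_to_medieval pvDomStr at this
      exact List.all_eq_true.mp this c hc
    exact char_eq c this
  split_ifs with h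
  · subst h; rfl
  · rw [hmap]
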